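-- pv_equiv track=rewrite | github.com/monkey0211/AlgoInPython | Two Pointers & Array/Meta_Two Sum Max.py | max_sum_of_two
-- ===== SOURCE A (Python) =====
-- from typing import List
--
-- def max_sum_of_two(nums: List[int]) -> int:
--     if not nums or len(nums) < 3: return 0   # nums至少有三个数
--
--     tmp_max = max(nums[0], nums[1])
--     ret = nums[0] + nums[2]
--     for i in range(3, len(nums)):             # 从第四个数开始看
--         tmp_ret = tmp_max + nums[i]
--         ret = max(ret, tmp_ret)
--         tmp_max = max(tmp_max, nums[i - 1])
--     return ret
-- ===== SOURCE B (Python) =====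
-- from typing import List
--
-- def max_sum_of_two(nums: List[int]) -> int:
--     if not nums or len(nums) < 3: return 0
--     # prefix-maximum table: pref[k] = max(nums[:k+1])
--     pref = [nums[0]]
--     for x in nums[1:]:
--         pref.append(max(pref[-1], x))
--     return max(pref[i - 2] + nums[i] for i in range(2, len(nums)))
-- ===== Notes on version B (the rewrite author's own statement) =====
-- stated objective: alternative
-- what changed: Replaces A's single interleaved scan (running max and running answer updated together) with two separate passes: first build an explicit prefix-maximum table pref, then take the max of pref[i-2]+nums[i] over i in range(2, n).
import Mathlib
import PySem

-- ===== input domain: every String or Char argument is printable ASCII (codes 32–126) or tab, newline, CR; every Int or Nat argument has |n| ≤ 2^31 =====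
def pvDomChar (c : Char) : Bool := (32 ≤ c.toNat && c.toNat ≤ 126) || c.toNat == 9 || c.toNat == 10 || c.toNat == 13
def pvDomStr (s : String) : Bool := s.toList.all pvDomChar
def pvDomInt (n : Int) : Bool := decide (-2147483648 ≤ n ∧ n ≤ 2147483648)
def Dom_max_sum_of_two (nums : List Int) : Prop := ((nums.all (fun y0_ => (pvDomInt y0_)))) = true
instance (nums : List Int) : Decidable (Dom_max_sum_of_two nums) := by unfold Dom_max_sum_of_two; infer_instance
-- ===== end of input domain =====

-- B replaces A's interleaved single scan with two separate passes (an explicit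
-- prefix-maximum table, then a max over pref[i-2]+nums[i]); alternative, not faster.

-- ===== PORT A =====
def max_sum_of_two (nums : List Int) : Int :=
  if nums = [] ∨ nums.length < 3 then 0
  else
    let tmp_max := max (PySem.List.pyGetD nums 0 0) (PySem.List.pyGetD nums 1 0)
    let ret := PySem.List.pyGetD nums 0 0 + PySem.List.pyGetD nums 2 0
    let s := (PySem.List.pyRange 3 (nums.length : Int) 1).foldl
      (fun (s : Int × Int) i =>
        (max s.1 (s.2 + PySem.List.pyGetD nums i 0),
         max s.2 (PySem.List.pyGetD nums (i - 1) 0)))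
      (ret, tmp_max)
    s.1

-- ===== PORT B =====
def max_sum_of_two_alt (nums : List Int) : Int :=
  if nums = [] ∨ nums.length < 3 then 0
  else
    let pref := (nums.drop 1).foldl
      (fun acc x => acc ++ [max (acc.getLastD 0) x]) [PySem.List.pyGetD nums 0 0]
    let terms := (PySem.List.pyRange 2 (nums.length : Int) 1).map
      (fun i => PySem.List.pyGetD pref (i - 2) 0 + PySem.List.pyGetD nums i 0)
    match terms with
    | [] => 0       -- unreachable: length ≥ 3 makes terms nonempty
    | h :: t => t.foldl max h

-- ===== PRECONDITION & SPEC =====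
def Spec_max_sum_of_two (nums : List Int) (out : Int) : Prop := out = max_sum_of_two_alt nums
instance (nums : List Int) (out : Int) : Decidable (Spec_max_sum_of_two nums out) := by unfold Spec_max_sum_of_two; infer_instance

-- ===== CLAIM (what is proved, stated in full; the proofs are below) =====
def Claim_equal_max_sum_of_two : Prop := ∀ (nums : List Int), Dom_max_sum_of_two nums → Spec_max_sum_of_two nums (max_sum_of_two nums)

-- ===== LEMMAS AND PROOFS =====

-- prefix maximum: pm nums k = max(nums[:k+1])
def pm (nums : List Int) : Nat → Int
  | 0 => nums.getD 0 0
  | k+1 => max (pm nums k) (nums.getD (k+1) 0)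

-- running answer: rs nums j = max over i in [2, 3+j) of pm (i-2) + nums[i]
def rs (nums : List Int) : Nat → Int
  | 0 => nums.getD 0 0 + nums.getD 2 0
  | j+1 => max (rs nums j) (pm nums (j+1) + nums.getD (j+3) 0)

lemma pref_build (nums : List Int) :
    ∀ (m k : Nat), nums.length = k + 1 + m →
      (nums.drop (k+1)).foldl (fun acc x => acc ++ [max (acc.getLastD 0) x])
        ((List.range (k+1)).map (pm nums))
      = (List.range nums.length).map (pm nums) := by
  intro m
  induction m with
  | zero =>
      intro k hk
      rw [List.drop_eq_nil_of_le (by omega)]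
      simp [hk]
  | succ m ih =>
      intro k hk
      have hlt : k + 1 < nums.length := by omega
      rw [List.drop_eq_getElem_cons hlt, List.foldl_cons]
      have hlast : (((List.range (k+1)).map (pm nums)).getLastD 0) = pm nums k := by
        rw [List.range_succ, List.map_append]
        simp
      have hget : nums[k+1] = nums.getD (k+1) 0 := by
        rw [List.getD_eq_getElem _ _ hlt]
      have hstep : ((List.range (k+1)).map (pm nums)) ++ [max (((List.range (k+1)).map (pm nums)).getLastD 0) nums[k+1]]
          = (List.range (k+2)).map (pm nums) := by
        rw [hlast, hget]
        simp [List.range_succ, pm, List.getD_eq_getElem?_getD]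
      rw [hstep]
      exact ih (k+1) (by omega)

lemma a_loop (nums : List Int) :
    ∀ j : Nat,
      (PySem.List.pyRange 3 (3 + (j:Int)) 1).foldl
        (fun (s : Int × Int) i =>
          (max s.1 (s.2 + PySem.List.pyGetD nums i 0),
           max s.2 (PySem.List.pyGetD nums (i - 1) 0)))
        (nums.getD 0 0 + nums.getD 2 0, pm nums 1)
      = (rs nums j, pm nums (j+1)) := by
  intro j
  induction j with
  | zero => simp [PySem.List.pyRange_one_eq_nil, rs]
  | succ j ih =>
      have h1 : (3 : Int) + ((j:Int)+1) = (3 + (j:Int)) + 1 := by ring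
      rw [Nat.cast_add, Nat.cast_one, h1,
        PySem.List.pyRange_one_succ_right (by omega), List.foldl_append, ih]
      have e1 : PySem.List.pyGetD nums (3 + (j:Int)) 0 = nums.getD (j+3) 0 := by
        have : (3 + (j:Int)) = ((j+3 : Nat) : Int) := by push_cast; ring
        rw [this, PySem.List.pyGetD_natCast]
      have e2 : PySem.List.pyGetD nums (3 + (j:Int) - 1) 0 = nums.getD (j+2) 0 := by
        have : (3 + (j:Int) - 1) = ((j+2 : Nat) : Int) := by push_cast; ring
        rw [this, PySem.List.pyGetD_natCast]
      simp only [List.foldl_cons, List.foldl_nil, e1, e2]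
      have : pm nums (j+2) = max (pm nums (j+1)) (nums.getD (j+2) 0) := rfl
      simp [rs, this]

lemma b_fold (nums : List Int) (n : Nat) (hn : n = nums.length) :
    ∀ j : Nat, 3 + j ≤ n →
      ((PySem.List.pyRange 3 (3 + (j:Int)) 1).map
        (fun i => PySem.List.pyGetD ((List.range n).map (pm nums)) (i - 2) 0
                  + PySem.List.pyGetD nums i 0)).foldl max (rs nums 0)
      = rs nums j := by
  intro j
  induction j with
  | zero => intro _; simp [PySem.List.pyRange_one_eq_nil]
  | succ j ih =>
      intro hj
      have h1 : (3 : Int) + ((j:Int)+1) = (3 + (j:Int)) + 1 := by ring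
      rw [Nat.cast_add, Nat.cast_one, h1,
        PySem.List.pyRange_one_succ_right (by omega), List.map_append,
        List.foldl_append, ih (by omega)]
      have e1 : PySem.List.pyGetD ((List.range n).map (pm nums)) (3 + (j:Int) - 2) 0
          = pm nums (j+1) := by
        have h : (3 + (j:Int) - 2) = ((j+1 : Nat) : Int) := by push_cast; ring
        rw [h, PySem.List.pyGetD_natCast, PySem.List.getD_map_range (pm nums) n (j+1) 0 (by omega)]
      have e2 : PySem.List.pyGetD nums (3 + (j:Int)) 0 = nums.getD (j+3) 0 := by
        have : (3 + (j:Int)) = ((j+3 : Nat) : Int) := by push_cast; ring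
        rw [this, PySem.List.pyGetD_natCast]
      simp [e1, e2, rs]

lemma pyGetD_two (nums : List Int) : PySem.List.pyGetD nums 2 0 = nums.getD 2 0 := by
  have : (2 : Int) = ((2 : Nat) : Int) := by norm_num
  rw [this, PySem.List.pyGetD_natCast]

lemma pyGetD_zero' (nums : List Int) : PySem.List.pyGetD nums 0 0 = nums.getD 0 0 := by
  have : (0 : Int) = ((0 : Nat) : Int) := by norm_num
  rw [this, PySem.List.pyGetD_natCast]

lemma pyGetD_one (nums : List Int) : PySem.List.pyGetD nums 1 0 = nums.getD 1 0 := by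
  have : (1 : Int) = ((1 : Nat) : Int) := by norm_num
  rw [this, PySem.List.pyGetD_natCast]

-- ===== VERDICT (by name: the statement is the Claim_ definition above) =====
theorem max_sum_of_two_spec : Claim_equal_max_sum_of_two := by
  intro nums _
  unfold Spec_max_sum_of_two max_sum_of_two max_sum_of_two_alt
  by_cases hg : nums = [] ∨ nums.length < 3
  · simp [hg]
  · simp only [hg, if_false]
    rw [not_or] at hg
    obtain ⟨hne, hlen⟩ := hg
    rw [Nat.not_lt] at hlen
    set n := nums.length with hn
    -- B's pref list is the prefix-maximum table
    have hpref : (nums.drop 1).foldl (fun acc x => acc ++ [max (acc.getLastD 0) x])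
        [PySem.List.pyGetD nums 0 0] = (List.range n).map (pm nums) := by
      have h0 : [PySem.List.pyGetD nums 0 0] = (List.range 1).map (pm nums) := by
        simp [pm, pyGetD_zero']
      rw [h0]
      exact pref_build nums (n - 1) 0 (by omega)
    rw [hpref]
    -- split the i = 2 head off B's range
    have hcast : (n : Int) = 3 + ((n - 3 : Nat) : Int) := by omega
    have hhead : PySem.List.pyRange 2 (n : Int) 1 = 2 :: PySem.List.pyRange 3 (n : Int) 1 := by
      rw [PySem.List.pyRange_one_cons (by exact_mod_cast by omega : (2:Int) < (n:Int))]
      norm_num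
    rw [hhead, List.map_cons]
    have hgoal2 : PySem.List.pyGetD ((List.range n).map (pm nums)) (2 - 2) 0
        + PySem.List.pyGetD nums 2 0 = rs nums 0 := by
      have h22 : (2 : Int) - 2 = ((0 : Nat) : Int) := by norm_num
      rw [h22, PySem.List.pyGetD_natCast, PySem.List.getD_map_range (pm nums) n 0 0 (by omega),
        pyGetD_two]
      simp [pm, rs]
    rw [hgoal2]
    have hB := b_fold nums n hn (n - 3) (by omega)
    rw [hcast] at *
    show _ = List.foldl max (rs nums 0)
      ((PySem.List.pyRange 3 (3 + ((n - 3 : Nat) : Int)) 1).map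
        (fun i => PySem.List.pyGetD ((List.range n).map (pm nums)) (i - 2) 0
                  + PySem.List.pyGetD nums i 0))
    rw [hB]
    -- A side
    have hmax1 : max (PySem.List.pyGetD nums 0 0) (PySem.List.pyGetD nums 1 0) = pm nums 1 := by
      simp [pm, pyGetD_zero', pyGetD_one]
    have hr0 : PySem.List.pyGetD nums 0 0 + PySem.List.pyGetD nums 2 0
        = nums.getD 0 0 + nums.getD 2 0 := by rw [pyGetD_zero', pyGetD_two]
    rw [hmax1, hr0, a_loop nums (n - 3)]
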